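-- pv_equiv track=rewrite | github.com/dsc-sookmyung/2022-02-CodingTest-Study | Week2_Implementation/minji/14-외벽점검.py | solution
-- ===== SOURCE A (Python) =====
-- from itertools import permutations
--
-- def solution(n, weak, dist):
--   # 길이를 2배로 늘려 원형을 일자 형태로
--   length = len(weak)
--   for i in range(length):
--     weak.append(weak[i] + n)
--   answer = len(dist) + 1 # 투입할 친구의 최솟값 (전체 친구 + 1로 초기화)
--
--   for start in range(length): # 시작점(첫 1바퀴)
--     # 친구를 나열하는 모든 경우의 수
--     for friends in list(permutations(dist, len(dist))):
--       count = 1 # 투입할 친구 수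
--       # 해당 친구가 점검할 수 있는 마지막 위치
--       position = weak[start] + friends[count - 1]
--       # 시작점부터 모든 취약 지점을 확인
--       for index in range(start, start + length):
--         # 점검할 수 있는 위치를 벗어난 경우
--         if position < weak[index]:
--           count += 1 # 새로운 친구 투입
--           # 더 투입할 친구가 없으면 종료
--           if count > len(dist):
--             break
--           position = weak[start] + friends[count - 1]
--       answer = min(answer, count)
--
--   # 친구들을 모두 투입해도 취약 지점을 모두 점검할 수 없는 경우
--   if answer > len(dist):
--     return -1
--
--   return answer
-- ===== SOURCE B (Python) =====
-- from itertools import permutations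
--
-- # B: answer-search — find the smallest number k of friends for which some start and
-- # some k-arrangement passes A's greedy check, stopping at the first feasible k,
-- # instead of minimising the count over all full permutations.
-- # Like A, mutates `weak` in place (appends weak[i] + n for each original index).
-- def solution(n, weak, dist):
--     length = len(weak)
--     for i in range(length):
--         weak.append(weak[i] + n)
--     for k in range(1, len(dist) + 1):
--         for start in range(length):
--             base = weak[start]
--             for friends in permutations(dist, k):
--                 count = 1
--                 position = base + friends[0]
--                 ok = True
--                 for index in range(start, start + length):
--                     if position < weak[index]:
--                         count += 1
--                         if count > k:
--                             ok = False
--                             break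
--                         position = base + friends[count - 1]
--                 if ok:
--                     return k
--     return -1
-- ===== Notes on version B (the rewrite author's own statement) =====
-- stated objective: alternative
-- what changed: A minimises the greedy friend-count over every start and every full permutation of dist; B searches the answer instead: for k = 1..len(dist) it asks whether any start and any k-arrangement passes the greedy check and returns the first feasible k (early exit), else -1.
-- outside the precondition, e.g. on solution(5, [1], []): A raises IndexError, B returns -1
-- crash fix: When weak is nonempty and dist is empty, A raises IndexError (friends[0] on the empty tuple); B returns -1. — e.g. on solution(5, [1], []): A raises IndexError, B returns -1
import Mathlib
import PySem

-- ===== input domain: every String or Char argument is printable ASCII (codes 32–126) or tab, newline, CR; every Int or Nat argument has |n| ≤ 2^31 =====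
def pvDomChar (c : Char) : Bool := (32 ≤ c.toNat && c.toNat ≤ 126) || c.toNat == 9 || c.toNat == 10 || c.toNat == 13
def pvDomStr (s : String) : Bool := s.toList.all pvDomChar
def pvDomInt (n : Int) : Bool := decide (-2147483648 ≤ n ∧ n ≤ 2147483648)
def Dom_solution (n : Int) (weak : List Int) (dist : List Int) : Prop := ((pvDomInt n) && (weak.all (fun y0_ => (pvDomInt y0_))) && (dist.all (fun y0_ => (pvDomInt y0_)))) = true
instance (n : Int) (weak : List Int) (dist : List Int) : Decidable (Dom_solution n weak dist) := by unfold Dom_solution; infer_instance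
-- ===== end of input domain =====

-- B restructures A's exhaustive minimisation as an answer-search (smallest feasible
-- number of friends, early exit); equivalence is about the RETURN value — both
-- Pythons additionally mutate `weak` identically (append weak[i] + n).

-- ===== PORT A =====
-- itertools.permutations(l, k): all k-arrangements by position (shared by both Pythons)
def pyPermutations : List Int → Nat → List (List Int)
  | _, 0 => [[]]
  | l, k+1 => (List.range l.length).flatMap
      (fun i => (pyPermutations (l.eraseIdx i) k).map (fun p => l.getD i 0 :: p))

-- A's inner `for index in range(start, start+length)` loop; indices are always in
-- range of weak2, so getD is exact.
def aLoop (weak2 : List Int) (base : Int) (friends : List Int) (m : Nat) :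
    List Nat → Nat → Int → Nat
  | [], count, _ => count
  | idx :: rest, count, position =>
    if position < weak2.getD idx 0 then
      if count + 1 > m then count + 1
      else aLoop weak2 base friends m rest (count + 1) (base + friends.getD count 0)
    else aLoop weak2 base friends m rest count position

def solution (n : Int) (weak : List Int) (dist : List Int) : Int :=
  let length := weak.length
  -- Python appends weak[i] + n for each i < length; each read is from the original prefix
  let weak2 := weak ++ weak.map (fun w => w + n)
  let answer := (List.range length).foldl (fun answer start =>
      (pyPermutations dist dist.length).foldl (fun answer friends =>
        min answer (aLoop weak2 (weak2.getD start 0) friends dist.length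
          (List.range' start length) 1 (weak2.getD start 0 + friends.getD 0 0))) answer)
    (dist.length + 1)
  if answer > dist.length then (-1 : Int) else (answer : Int)

-- ===== PORT B =====
-- B's greedy check for one start and one k-arrangement (returns ok : Bool)
def bLoop (weak2 : List Int) (base : Int) (friends : List Int) (k : Nat) :
    List Nat → Nat → Int → Bool
  | [], _, _ => true
  | idx :: rest, count, position =>
    if position < weak2.getD idx 0 then
      if count + 1 > k then false
      else bLoop weak2 base friends k rest (count + 1) (base + friends.getD count 0)
    else bLoop weak2 base friends k rest count position

-- `for start … : for friends in permutations(dist, k): … if ok: return k`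
def bCheck (weak2 : List Int) (dist : List Int) (length k : Nat) : Bool :=
  (List.range length).any (fun start =>
    (pyPermutations dist k).any (fun friends =>
      bLoop weak2 (weak2.getD start 0) friends k
        (List.range' start length) 1 (weak2.getD start 0 + friends.getD 0 0)))

-- `for k in range(1, len(dist)+1)`, first feasible k, else -1
def bSearch (weak2 : List Int) (dist : List Int) (length : Nat) : List Nat → Int
  | [] => -1
  | k :: ks => if bCheck weak2 dist length k then (k : Int) else bSearch weak2 dist length ks

def solution_alt (n : Int) (weak : List Int) (dist : List Int) : Int :=
  let length := weak.length
  let weak2 := weak ++ weak.map (fun w => w + n)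
  bSearch weak2 dist length (List.range' 1 dist.length)

-- ===== PRECONDITION & SPEC =====
-- Pre_ excludes only the inputs where Python A raises: dist = [] with weak ≠ []
-- (friends[0] on the empty tuple raises IndexError).
def Pre_solution (n : Int) (weak : List Int) (dist : List Int) : Prop :=
  dist ≠ [] ∨ weak = []
instance (n : Int) (weak : List Int) (dist : List Int) : Decidable (Pre_solution n weak dist) := by unfold Pre_solution; infer_instance

def pvWitness_solution : Int × List Int × List Int := (7, [1, 5, 6], [1, 2, 3])

-- When weak is nonempty and dist is empty, A raises IndexError; B returns -1.
def Raises_solution (n : Int) (weak : List Int) (dist : List Int) : Prop :=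
  weak ≠ [] ∧ dist = []
instance (n : Int) (weak : List Int) (dist : List Int) : Decidable (Raises_solution n weak dist) := by unfold Raises_solution; infer_instance
def pvRaiseWitness_solution : Int × List Int × List Int := (5, [1], [])
def pvRaiseWitnessOut_solution : Int := -1

def Spec_solution (n : Int) (weak : List Int) (dist : List Int) (out : Int) : Prop := out = solution_alt n weak dist
instance (n : Int) (weak : List Int) (dist : List Int) (out : Int) : Decidable (Spec_solution n weak dist out) := by unfold Spec_solution; infer_instance

-- ===== CLAIM (what is proved, stated in full; the proofs are below) =====
def Claim_equal_solution : Prop := ∀ (n : Int) (weak : List Int) (dist : List Int), Dom_solution n weak dist → Pre_solution n weak dist → Spec_solution n weak dist (solution n weak dist)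

def Claim_raises_solution : Prop := (∀ (n : Int) (weak : List Int) (dist : List Int), Dom_solution n weak dist → Raises_solution n weak dist → ¬ Pre_solution n weak dist) ∧ (Dom_solution (pvRaiseWitness_solution.1) (pvRaiseWitness_solution.2.1) (pvRaiseWitness_solution.2.2) ∧ Raises_solution (pvRaiseWitness_solution.1) (pvRaiseWitness_solution.2.1) (pvRaiseWitness_solution.2.2) ∧ solution_alt (pvRaiseWitness_solution.1) (pvRaiseWitness_solution.2.1) (pvRaiseWitness_solution.2.2) = pvRaiseWitnessOut_solution)

-- ===== LEMMAS AND PROOFS =====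

theorem aLoop_mono (weak2 : List Int) (base : Int) (friends : List Int) (m : Nat) :
    ∀ (idxs : List Nat) (count : Nat) (pos : Int),
      count ≤ aLoop weak2 base friends m idxs count pos := by
  intro idxs
  induction idxs with
  | nil => intro count pos; simp [aLoop]
  | cons idx rest ih =>
    intro count pos
    simp only [aLoop]
    split_ifs with h1 h2
    · omega
    · exact le_trans (by omega) (ih (count + 1) _)
    · exact ih count pos

-- core: A's greedy count with the full arrangement is ≤ k iff B's check with a
-- k-prefix-agreeing arrangement succeeds
theorem aLoop_le_iff_bLoop (weak2 : List Int) (base : Int) (friends q : List Int)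
    (m k : Nat) (hk : k ≤ m) (hq : ∀ j, j < k → friends.getD j 0 = q.getD j 0) :
    ∀ (idxs : List Nat) (count : Nat) (pos : Int), count ≤ k →
      (aLoop weak2 base friends m idxs count pos ≤ k ↔
        bLoop weak2 base q k idxs count pos = true) := by
  intro idxs
  induction idxs with
  | nil => intro count pos hc; simp [aLoop, bLoop, hc]
  | cons idx rest ih =>
    intro count pos hc
    simp only [aLoop, bLoop]
    split_ifs with h1 h2 h3 h4
    · -- count+1 > m and count+1 > k : both fail
      simp; omega
    · -- count+1 > m but count+1 ≤ k : impossible since k ≤ m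
      omega
    · -- count+1 ≤ m, count+1 > k : A keeps going but count already > k
      have hmono := aLoop_mono weak2 base friends m rest (count + 1)
        (base + friends.getD count 0)
      simp only [iff_false]
      omega
    · -- both recurse with the same friend value
      rw [hq count (by omega)]
      exact ih (count + 1) _ (by omega)
    · exact ih count pos hc

theorem mem_pyPermutations_succ (l : List Int) (k : Nat) (q : List Int) :
    q ∈ pyPermutations l (k+1) ↔
      ∃ i, i < l.length ∧ ∃ q', q' ∈ pyPermutations (l.eraseIdx i) k ∧ q = l.getD i 0 :: q' := by
  constructor
  · intro h
    simp only [pyPermutations, List.mem_flatMap, List.mem_map, List.mem_range] at h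
    obtain ⟨i, hi, q', hq', rfl⟩ := h
    exact ⟨i, hi, q', hq', rfl⟩
  · rintro ⟨i, hi, q', hq', rfl⟩
    simp only [pyPermutations, List.mem_flatMap, List.mem_map, List.mem_range]
    exact ⟨i, hi, q', hq', rfl⟩

theorem pyPermutations_full_exists : ∀ (l : List Int), ∃ p, p ∈ pyPermutations l l.length := by
  intro l
  induction l with
  | nil => exact ⟨[], by simp [pyPermutations]⟩
  | cons x xs ih =>
    obtain ⟨p, hp⟩ := ih
    refine ⟨x :: p, ?_⟩
    rw [show (x :: xs).length = xs.length + 1 from rfl, mem_pyPermutations_succ]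
    exact ⟨0, by simp, p, by simpa using hp, rfl⟩

theorem take_mem_pyPermutations :
    ∀ (k m : Nat) (l p : List Int), k ≤ m → p ∈ pyPermutations l m →
      p.take k ∈ pyPermutations l k := by
  intro k
  induction k with
  | zero => intro m l p _ _; simp [pyPermutations]
  | succ k ih =>
    intro m l p hk hp
    cases m with
    | zero => omega
    | succ m =>
      rw [mem_pyPermutations_succ] at hp
      obtain ⟨i, hi, p', hp', rfl⟩ := hp
      rw [List.take_succ_cons, mem_pyPermutations_succ]
      exact ⟨i, hi, p'.take k, ih m _ p' (by omega) hp', rfl⟩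

theorem extend_pyPermutations :
    ∀ (k : Nat) (l q : List Int), k ≤ l.length → q ∈ pyPermutations l k →
      ∃ p, p ∈ pyPermutations l l.length ∧ p.take k = q := by
  intro k
  induction k with
  | zero =>
    intro l q _ hq
    simp only [pyPermutations, List.mem_singleton] at hq
    subst hq
    obtain ⟨p, hp⟩ := pyPermutations_full_exists l
    exact ⟨p, hp, by simp⟩
  | succ k ih =>
    intro l q hk hq
    rw [mem_pyPermutations_succ] at hq
    obtain ⟨i, hi, q', hq', rfl⟩ := hq
    have hlen : (l.eraseIdx i).length = l.length - 1 := by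
      rw [List.length_eraseIdx]
      simp [hi]
    obtain ⟨p', hp', htake⟩ := ih (l.eraseIdx i) q' (by omega) hq'
    refine ⟨l.getD i 0 :: p', ?_, by simp [htake]⟩
    have hL : l.length = (l.eraseIdx i).length + 1 := by omega
    rw [hL, mem_pyPermutations_succ]
    exact ⟨i, by omega, p', hp', rfl⟩

theorem getD_take_agree (p : List Int) (k : Nat) :
    ∀ j, j < k → p.getD j 0 = (p.take k).getD j 0 := by
  induction p generalizing k with
  | nil => simp
  | cons x xs ih =>
    intro j hj
    cases k with
    | zero => omega
    | succ k =>
      cases j with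
      | zero => simp
      | succ j => simpa using ih k j (by omega)

theorem foldMin_le_iff (f : List Int → Nat) :
    ∀ (P : List (List Int)) (a k : Nat),
      (P.foldl (fun acc p => min acc (f p)) a ≤ k) ↔ a ≤ k ∨ ∃ p ∈ P, f p ≤ k := by
  intro P
  induction P with
  | nil => intro a k; simp
  | cons p P ih =>
    intro a k
    simp only [List.foldl_cons]
    rw [ih]
    simp only [List.mem_cons, min_le_iff]
    constructor
    · rintro (⟨h | h⟩ | ⟨x, hx, h⟩)
      · exact Or.inl h
      · exact Or.inr ⟨p, Or.inl rfl, h⟩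
      · exact Or.inr ⟨x, Or.inr hx, h⟩
    · rintro (h | ⟨x, (rfl | hx), h⟩)
      · exact Or.inl (Or.inl h)
      · exact Or.inl (Or.inr h)
      · exact Or.inr ⟨x, hx, h⟩

theorem foldMin_mem (f : List Int → Nat) :
    ∀ (P : List (List Int)) (a : Nat),
      P.foldl (fun acc p => min acc (f p)) a = a ∨
        ∃ p ∈ P, P.foldl (fun acc p => min acc (f p)) a = f p := by
  intro P
  induction P with
  | nil => intro a; left; rfl
  | cons p P ih =>
    intro a
    simp only [List.foldl_cons]
    rcases ih (min a (f p)) with h | ⟨p', hp', h⟩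
    · rcases min_cases a (f p) with ⟨hm, _⟩ | ⟨hm, _⟩
      · left; rw [h, hm]
      · right; exact ⟨p, List.mem_cons_self, by rw [h, hm]⟩
    · right; exact ⟨p', List.mem_cons_of_mem _ hp', h⟩

theorem nestedFold_le_iff (c : Nat → List Int → Nat) (P : List (List Int)) :
    ∀ (S : List Nat) (a k : Nat),
      (S.foldl (fun acc s => P.foldl (fun acc p => min acc (c s p)) acc) a ≤ k) ↔
        a ≤ k ∨ ∃ s ∈ S, ∃ p ∈ P, c s p ≤ k := by
  intro S
  induction S with
  | nil => intro a k; simp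
  | cons s S ih =>
    intro a k
    simp only [List.foldl_cons]
    rw [ih, foldMin_le_iff (c s)]
    simp only [List.mem_cons]
    constructor
    · rintro ((h | ⟨p, hp, h⟩) | ⟨s', hs', p, hp, h⟩)
      · exact Or.inl h
      · exact Or.inr ⟨s, Or.inl rfl, p, hp, h⟩
      · exact Or.inr ⟨s', Or.inr hs', p, hp, h⟩
    · rintro (h | ⟨s', (rfl | hs'), p, hp, h⟩)
      · exact Or.inl (Or.inl h)
      · exact Or.inl (Or.inr ⟨p, hp, h⟩)
      · exact Or.inr ⟨s', hs', p, hp, h⟩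

theorem nestedFold_mem (c : Nat → List Int → Nat) (P : List (List Int)) :
    ∀ (S : List Nat) (a : Nat),
      S.foldl (fun acc s => P.foldl (fun acc p => min acc (c s p)) acc) a = a ∨
        ∃ s ∈ S, ∃ p ∈ P,
          S.foldl (fun acc s => P.foldl (fun acc p => min acc (c s p)) acc) a = c s p := by
  intro S
  induction S with
  | nil => intro a; left; rfl
  | cons s S ih =>
    intro a
    simp only [List.foldl_cons]
    rcases ih (P.foldl (fun acc p => min acc (c s p)) a) with h | ⟨s', hs', p, hp, h⟩
    · rcases foldMin_mem (c s) P a with h2 | ⟨p, hp, h2⟩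
      · left; rw [h, h2]
      · right; exact ⟨s, List.mem_cons_self, p, hp, by rw [h, h2]⟩
    · right; exact ⟨s', List.mem_cons_of_mem _ hs', p, hp, h⟩

theorem bSearch_none (weak2 : List Int) (dist : List Int) (length : Nat) :
    ∀ ks, (∀ j ∈ ks, bCheck weak2 dist length j = false) →
      bSearch weak2 dist length ks = -1 := by
  intro ks
  induction ks with
  | nil => intro _; rfl
  | cons k ks ih =>
    intro h
    simp only [bSearch]
    rw [h k List.mem_cons_self]
    simp only [Bool.false_eq_true, if_false]
    exact ih (fun j hj => h j (List.mem_cons_of_mem _ hj))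

theorem bSearch_first (weak2 : List Int) (dist : List Int) (length t : Nat) :
    ∀ (cnt s : Nat), s ≤ t → t < s + cnt →
      (∀ j, s ≤ j → j < s + cnt → (bCheck weak2 dist length j = true ↔ t ≤ j)) →
      bSearch weak2 dist length (List.range' s cnt) = (t : Int) := by
  intro cnt
  induction cnt with
  | zero => intro s h1 h2 _; omega
  | succ cnt ih =>
    intro s hs ht h
    rw [List.range'_succ]
    simp only [bSearch]
    by_cases hst : s = t
    · subst hst
      rw [if_pos ((h s le_rfl (by omega)).mpr le_rfl)]
    · have hslt : s < t := by omega
      rw [if_neg ?_]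
      · exact ih (s + 1) (by omega) (by omega)
          (fun j h1 h2 => h j (by omega) (by omega))
      · intro hb
        have := (h s le_rfl (by omega)).mp hb
        omega


-- proof-side abbreviations for the doubled wall and A's per-(start,arrangement) count
def pvW (n : Int) (weak : List Int) : List Int := weak ++ weak.map (fun w => w + n)

def cC (n : Int) (weak dist : List Int) (s : Nat) (p : List Int) : Nat :=
  aLoop (pvW n weak) ((pvW n weak).getD s 0) p dist.length
    (List.range' s weak.length) 1 ((pvW n weak).getD s 0 + p.getD 0 0)

theorem feas_iff (n : Int) (weak dist : List Int) :
    ∀ k, 1 ≤ k → k ≤ dist.length →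
      (bCheck (pvW n weak) dist weak.length k = true ↔
        ∃ s ∈ List.range weak.length, ∃ p ∈ pyPermutations dist dist.length,
          cC n weak dist s p ≤ k) := by
  intro k hk1 hkm
  unfold bCheck
  rw [List.any_eq_true]
  constructor
  · rintro ⟨s, hs, hb⟩
    rw [List.any_eq_true] at hb
    obtain ⟨q, hq, hbl⟩ := hb
    obtain ⟨p, hp, htake⟩ := extend_pyPermutations k dist q hkm hq
    have hagree : ∀ j, j < k → p.getD j 0 = q.getD j 0 := by
      intro j hj
      rw [← htake]
      exact getD_take_agree p k j hj
    refine ⟨s, hs, p, hp, ?_⟩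
    unfold cC
    rw [hagree 0 hk1]
    exact (aLoop_le_iff_bLoop (pvW n weak) ((pvW n weak).getD s 0) p q dist.length k
      hkm hagree (List.range' s weak.length) 1 _ hk1).mpr hbl
  · rintro ⟨s, hs, p, hp, hle⟩
    refine ⟨s, hs, ?_⟩
    rw [List.any_eq_true]
    refine ⟨p.take k, take_mem_pyPermutations k dist.length dist p hkm hp, ?_⟩
    have hagree := getD_take_agree p k
    unfold cC at hle
    rw [hagree 0 hk1] at hle
    exact (aLoop_le_iff_bLoop (pvW n weak) ((pvW n weak).getD s 0) p (p.take k) dist.length k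
      hkm hagree (List.range' s weak.length) 1 _ hk1).mp hle

theorem main_eq (W dist : List Int) (L : Nat) (c : Nat → List Int → Nat) (A : Nat)
    (hA : A = (List.range L).foldl
        (fun acc s => (pyPermutations dist dist.length).foldl
          (fun acc p => min acc (c s p)) acc) (dist.length + 1))
    (hc1 : ∀ s p, 1 ≤ c s p)
    (hfeas : ∀ k, 1 ≤ k → k ≤ dist.length →
      (bCheck W dist L k = true ↔
        ∃ s ∈ List.range L, ∃ p ∈ pyPermutations dist dist.length, c s p ≤ k)) :
    (if A > dist.length then (-1 : Int) else (A : Int)) =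
      bSearch W dist L (List.range' 1 dist.length) := by
  have hA_le : ∀ k, A ≤ k ↔ dist.length + 1 ≤ k ∨
      ∃ s ∈ List.range L, ∃ p ∈ pyPermutations dist dist.length, c s p ≤ k := by
    intro k
    rw [hA]
    exact nestedFold_le_iff c (pyPermutations dist dist.length) (List.range L) (dist.length + 1) k
  have hmem := nestedFold_mem c (pyPermutations dist dist.length) (List.range L) (dist.length + 1)
  rw [← hA] at hmem
  have hA1 : 1 ≤ A := by
    rcases hmem with h | ⟨s, _, p, _, h⟩
    · omega
    · rw [h]; exact hc1 s p
  by_cases hAm : A ≤ dist.length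
  · rw [if_neg (by omega)]
    symm
    apply bSearch_first W dist L A dist.length 1 hA1 (by omega)
    intro j hj1 hj2
    rw [hfeas j hj1 (by omega)]
    constructor
    · intro hex
      exact (hA_le j).mpr (Or.inr hex)
    · intro hAj
      rcases (hA_le j).mp hAj with h | h
      · exact absurd h (by omega)
      · exact h
  · rw [if_pos (by omega)]
    symm
    apply bSearch_none
    intro j hj
    rw [List.mem_range'_1] at hj
    rw [Bool.eq_false_iff]
    intro hb
    have h1 := (hA_le j).mpr (Or.inr ((hfeas j (by omega) (by omega)).mp hb))
    omega

-- ===== VERDICT (by name: the statement is the Claim_ definition above) =====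
theorem solution_spec : Claim_equal_solution := by
  intro n weak dist _ _
  unfold Spec_solution
  exact main_eq (pvW n weak) dist weak.length (cC n weak dist)
    ((List.range weak.length).foldl
      (fun acc s => (pyPermutations dist dist.length).foldl
        (fun acc p => min acc (cC n weak dist s p)) acc) (dist.length + 1))
    rfl
    (fun s p => aLoop_mono (pvW n weak) ((pvW n weak).getD s 0) p dist.length
      (List.range' s weak.length) 1 ((pvW n weak).getD s 0 + p.getD 0 0))
    (feas_iff n weak dist)

@[simp] theorem solution_raises : Claim_raises_solution := by
  unfold Claim_raises_solution
  refine ⟨?_, by decide⟩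
  intro n weak dist _ hr hp
  rcases hr with ⟨hw, hd⟩
  rcases hp with h | h
  · exact h hd
  · exact hw h
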